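-- pv_equiv track=rewrite | github.com/capuadaniel/capuadaniel | Exercicios/codewars/6kyu_how_many_pages_in_a_book.py | amount_of_pages
-- ===== SOURCE A (Python) =====
-- def amount_of_pages(summary):
--     list = []
--     test = ''
--     ultimo = 0
--     for n in range(1,summary+1):
--         list.append(n)
--
--     for e in list:
--         if len(test) < int(summary):
--             test += str(e)
--             ultimo = e
--
--         else:
--             break
--
--     return ultimo
-- ===== SOURCE B (Python) =====
-- def amount_of_pages(summary):
--     # Walk pages in blocks of equal digit length (one-digit, two-digit, ...):
--     # each block of d-digit pages contributes 9*10**(d-1)*d characters, so the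
--     # stop page is found in O(log summary) arithmetic instead of one page at a time.
--     if summary <= 0:
--         return 0
--     remaining = summary
--     d = 1
--     while True:
--         block = 9 * 10 ** (d - 1) * d
--         if remaining <= block:
--             return 10 ** (d - 1) + (remaining + d - 1) // d - 1
--         remaining -= block
--         d += 1
-- ===== Notes on version B (the rewrite author's own statement) =====
-- stated objective: faster
-- what changed: Replaces the page-by-page string-concatenation loop with closed-form block arithmetic over the ranges of one-digit, two-digit, ... page numbers, computing the stop page by a ceiling division inside the located block.
import Mathlib
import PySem

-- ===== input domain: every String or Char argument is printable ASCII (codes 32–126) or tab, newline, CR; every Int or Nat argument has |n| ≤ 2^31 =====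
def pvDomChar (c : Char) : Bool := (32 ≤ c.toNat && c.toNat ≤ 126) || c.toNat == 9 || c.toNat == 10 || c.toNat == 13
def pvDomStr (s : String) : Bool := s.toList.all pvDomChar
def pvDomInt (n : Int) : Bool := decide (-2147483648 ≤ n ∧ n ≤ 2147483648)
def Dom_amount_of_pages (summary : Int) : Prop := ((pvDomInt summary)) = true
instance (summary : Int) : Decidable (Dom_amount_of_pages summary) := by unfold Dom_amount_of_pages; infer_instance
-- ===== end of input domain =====

-- B replaces A's page-by-page string concatenation by block digit-length arithmetic
-- (one-digit, two-digit, … page ranges), locating the stop page in O(log summary) steps.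

-- ===== PORT A =====
-- the second Python loop: walk the page list, appending str(e) to test while
-- len(test) < summary (test kept as List Char; len = list length), else break.
def loopA (s : Int) : List Int → List Char → Int → Int
  | [], _, ultimo => ultimo
  | e :: rest, test, ultimo =>
    if (test.length : Int) < s then loopA s rest (test ++ PySem.Int.toChars e) e
    else ultimo

-- first Python loop builds list = [1, …, summary] = range(1, summary+1)
def amount_of_pages (summary : Int) : Int :=
  loopA summary (PySem.List.pyRange 1 (summary + 1) 1) [] 0

-- ===== PORT B =====
-- while-loop of Source B; d is carried as d1 = d - 1 so the block size 9*10^d1*(d1+1)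
-- is positive by construction (termination measure: remaining).
def pagesLoop (r d1 : Nat) : Int :=
  let bd := 9 * 10 ^ d1 * (d1 + 1)
  if r ≤ bd then (10 : Int) ^ d1 + ((r + (d1 + 1) - 1) / (d1 + 1) : Nat) - 1
  else pagesLoop (r - bd) (d1 + 1)
termination_by r
decreasing_by
  have h10 : 0 < 9 * 10 ^ d1 * (d1 + 1) := by positivity
  omega

def amount_of_pages_alt (summary : Int) : Int :=
  if summary ≤ 0 then 0 else pagesLoop summary.toNat 0

-- ===== PRECONDITION & SPEC =====
def Spec_amount_of_pages (summary : Int) (out : Int) : Prop := out = amount_of_pages_alt summary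
instance (summary : Int) (out : Int) : Decidable (Spec_amount_of_pages summary out) := by unfold Spec_amount_of_pages; infer_instance

-- ===== CLAIM (what is proved, stated in full; the proofs are below) =====
def Claim_equal_amount_of_pages : Prop := ∀ (summary : Int), Dom_amount_of_pages summary → Spec_amount_of_pages summary (amount_of_pages summary)

-- ===== LEMMAS AND PROOFS =====

-- digit length of the page number n, exactly as A's `len(str(e))` computes it
def digLen (n : Nat) : Nat := (PySem.Int.toChars (n : Int)).length

-- total digit length of the concatenation str(1) + … + str(p)
def S : Nat → Nat
  | 0 => 0
  | p + 1 => S p + digLen (p + 1)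

theorem toDigitsCore_len : ∀ (f n : Nat) (l : List Char), n < f →
    (Nat.toDigitsCore 10 f n l).length = Nat.log 10 n + 1 + l.length := by
  intro f
  induction f with
  | zero => intro n l h; omega
  | succ f ih =>
    intro n l h
    rw [Nat.toDigitsCore]
    by_cases h10 : n / 10 = 0
    · have hn : n < 10 := by omega
      simp [h10, Nat.log_eq_zero_iff.mpr (Or.inl hn)]
      omega
    · have hn : 10 ≤ n := by
        by_contra hc
        exact h10 (Nat.div_eq_of_lt (by omega))
      have hdiv : n / 10 < f := by
        have := Nat.div_lt_self (by omega : 0 < n) (by norm_num : 1 < 10)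
        omega
      simp only [h10, if_false]
      rw [ih (n / 10) _ hdiv]
      have hlog := Nat.log_div_base 10 n
      have hpos : 0 < Nat.log 10 n := Nat.log_pos (by norm_num) hn
      simp [List.length]
      omega

theorem digLen_eq (n : Nat) : digLen n = Nat.log 10 n + 1 := by
  rw [digLen, PySem.Int.toChars, if_neg (by omega)]
  simp [Nat.toDigits]
  rw [toDigitsCore_len (n + 1) n [] (by omega)]
  simp

theorem digLen_range {d1 n : Nat} (h1 : 10 ^ d1 ≤ n) (h2 : n < 10 ^ (d1 + 1)) :
    digLen n = d1 + 1 := by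
  rw [digLen_eq, Nat.log_eq_of_pow_le_of_lt_pow h1 h2]

theorem S_mono : Monotone S := by
  apply monotone_nat_of_le_succ
  intro p
  simp [S]

theorem S_ge_self (p : Nat) : p ≤ S p := by
  induction p with
  | zero => simp [S]
  | succ p ih =>
    have : 1 ≤ digLen (p + 1) := by rw [digLen_eq]; omega
    simp [S]; omega

def leastPage (t : Nat) : Nat := Nat.find (⟨t, S_ge_self t⟩ : ∃ p, t ≤ S p)

theorem leastPage_eq {t p : Nat} (h1 : t ≤ S p) (h2 : ∀ m, m < p → S m < t) :
    leastPage t = p :=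
  (Nat.find_eq_iff _).mpr ⟨h1, fun m hm => not_le.mpr (h2 m hm)⟩

theorem S_block (d1 : Nat) : ∀ q, q ≤ 9 * 10 ^ d1 →
    S (10 ^ d1 - 1 + q) = S (10 ^ d1 - 1) + q * (d1 + 1) := by
  have hp : 1 ≤ 10 ^ d1 := Nat.one_le_pow _ _ (by norm_num)
  intro q
  induction q with
  | zero => simp
  | succ q ih =>
    intro hq
    have hqa : 10 ^ d1 - 1 + (q + 1) = (10 ^ d1 - 1 + q) + 1 := by omega
    rw [hqa, S, ih (by omega)]
    have hd : digLen (10 ^ d1 - 1 + q + 1) = d1 + 1 := by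
      apply digLen_range (by omega)
      have : 10 ^ (d1 + 1) = 10 * 10 ^ d1 := by ring
      omega
    rw [hd]; ring

theorem leastPage_le (t : Nat) : leastPage t ≤ t := Nat.find_le (S_ge_self t)
theorem leastPage_spec (t : Nat) : t ≤ S (leastPage t) := Nat.find_spec (⟨t, S_ge_self t⟩ : ∃ p, t ≤ S p)

theorem loopA_inv (t : Nat) : ∀ (n a : Nat) (test : List Char), t - a = n →
    a ≤ leastPage t → test.length = S a →
    loopA (t : Int) (PySem.List.pyRange ((a : Int) + 1) ((t : Int) + 1) 1) test (a : Int)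
      = (leastPage t : Int) := by
  intro n
  induction n with
  | zero =>
    intro a test hn hle hlen
    have hlp := leastPage_le t
    have hat : a = t := by omega
    rw [PySem.List.pyRange_one_eq_nil (by exact_mod_cast by omega : ((t : Int) + 1) ≤ (a : Int) + 1)]
    show (a : Int) = (leastPage t : Int)
    have : leastPage t = a := by omega
    rw [this]
  | succ n ih =>
    intro a test hn hle hlen
    have halt : a < t := by omega
    rw [PySem.List.pyRange_one_cons (by exact_mod_cast by omega : ((a : Int) + 1) < (t : Int) + 1)]
    rw [loopA]
    by_cases hS : S a < t
    · rw [if_pos (by rw [hlen]; exact_mod_cast hS)]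
      have hfs := leastPage_spec t
      have hlt : a < leastPage t := by
        rcases Nat.eq_or_lt_of_le hle with h | h
        · exfalso; rw [← h] at hfs; omega
        · exact h
      have hcast : (a : Int) + 1 = ((a + 1 : Nat) : Int) := by push_cast; ring
      rw [hcast]
      have := ih (a + 1) (test ++ PySem.Int.toChars ((a + 1 : Nat) : Int)) (by omega) (by omega)
        (by simp [hlen, S, digLen])
      exact this
    · rw [if_neg (by rw [hlen]; exact_mod_cast hS)]
      have hge : t ≤ S a := by omega
      have : leastPage t ≤ a := Nat.find_le hge
      have : leastPage t = a := by omega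
      rw [this]

theorem pagesLoop_eq : ∀ (r d1 t : Nat), 1 ≤ r → r + S (10 ^ d1 - 1) = t →
    pagesLoop r d1 = (leastPage t : Int) := by
  intro r
  induction r using Nat.strong_induction_on with
  | _ r IH =>
    intro d1 t hr ht
    rw [pagesLoop]
    have hp : 1 ≤ 10 ^ d1 := Nat.one_le_pow _ _ (by norm_num)
    by_cases h : r ≤ 9 * 10 ^ d1 * (d1 + 1)
    · rw [if_pos h]
      obtain ⟨q, hq⟩ : ∃ q, (r + (d1 + 1) - 1) / (d1 + 1) = q := ⟨_, rfl⟩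
      rw [hq]
      have hdm := Nat.div_add_mod (r + (d1 + 1) - 1) (d1 + 1)
      rw [hq] at hdm
      have hmlt : (r + (d1 + 1) - 1) % (d1 + 1) < d1 + 1 := Nat.mod_lt _ (by omega)
      have hq1 : 1 ≤ q := by
        rw [← hq, Nat.le_div_iff_mul_le (by omega : 0 < d1 + 1)]
        omega
      have e1 : q * (d1 + 1) = (d1 + 1) * q := by ring
      have e2 : (q - 1) * (d1 + 1) = (d1 + 1) * q - (d1 + 1) := by
        rw [Nat.sub_mul, one_mul, mul_comm]
      have hqle : q ≤ 9 * 10 ^ d1 := by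
        rw [← hq, Nat.div_le_iff_le_mul_add_pred (by omega : 0 < d1 + 1)]
        have e3 : (d1 + 1) * (9 * 10 ^ d1) = 9 * 10 ^ d1 * (d1 + 1) := by ring
        omega
      have hSq := S_block d1 q hqle
      have hSq1 := S_block d1 (q - 1) (by omega)
      have hfind : leastPage t = 10 ^ d1 - 1 + q := by
        apply leastPage_eq
        · rw [hSq]
          omega
        · intro m hm
          have hm' : m ≤ 10 ^ d1 - 1 + (q - 1) := by omega
          have hmono := S_mono hm'
          rw [hSq1] at hmono
          omega
      rw [hfind, Nat.cast_add, Nat.cast_sub hp]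
      push_cast
      ring
    · rw [if_neg h]
      have hbd : 0 < 9 * 10 ^ d1 * (d1 + 1) := by positivity
      apply IH (r - 9 * 10 ^ d1 * (d1 + 1)) (by omega) (d1 + 1) t (by omega)
      have hS := S_block d1 (9 * 10 ^ d1) le_rfl
      have hidx : 10 ^ d1 - 1 + 9 * 10 ^ d1 = 10 ^ (d1 + 1) - 1 := by
        have : 10 ^ (d1 + 1) = 10 * 10 ^ d1 := by ring
        omega
      rw [hidx] at hS
      omega

-- ===== VERDICT (by name: the statement is the Claim_ definition above) =====
theorem amount_of_pages_spec : Claim_equal_amount_of_pages := by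
  intro summary _
  unfold Spec_amount_of_pages amount_of_pages amount_of_pages_alt
  by_cases hs : summary ≤ 0
  · rw [if_pos hs, PySem.List.pyRange_one_eq_nil (by omega)]
    rfl
  · rw [if_neg hs]
    rw [not_le] at hs
    have ht : summary = (summary.toNat : Int) := by omega
    have h1 : 1 ≤ summary.toNat := by omega
    rw [ht]
    have hA := loopA_inv summary.toNat summary.toNat 0 [] (by omega) (Nat.zero_le _) rfl
    simp only [Nat.cast_zero, zero_add] at hA
    rw [hA]
    exact (pagesLoop_eq summary.toNat 0 summary.toNat h1 (by simp [S])).symm
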